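-- pv_equiv track=rewrite | github.com/AsthmaticDonkey/ComSci | CSC1015F/Assigment9/anagramsets.py | directory
-- ===== SOURCE A (Python) =====
-- def directory(words):
--     directAll = []
--     for i in range(len(words)):
--         directAll.append({})
--         wor = words[i]
--         for a in range(len(wor)):
--             le = wor[a]
--             if(le in directAll[i]):
--                 directAll[i][le] += 1
--             else:
--                 directAll[i][le] = 1
--     return directAll
-- ===== SOURCE B (Python) =====
-- def directory(words):
--     return [{c: list(word).count(c) for c in dict.fromkeys(word)} for word in words]
-- ===== Notes on version B (the rewrite author's own statement) =====
-- stated objective: alternative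
-- what changed: Replaces the index-driven single-pass incremental counting loop (append {} then bump/insert per character) with a dict comprehension over the distinct letters (dict.fromkeys) that re-counts each letter with list.count, inside one list comprehension over the words.
import Mathlib
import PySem

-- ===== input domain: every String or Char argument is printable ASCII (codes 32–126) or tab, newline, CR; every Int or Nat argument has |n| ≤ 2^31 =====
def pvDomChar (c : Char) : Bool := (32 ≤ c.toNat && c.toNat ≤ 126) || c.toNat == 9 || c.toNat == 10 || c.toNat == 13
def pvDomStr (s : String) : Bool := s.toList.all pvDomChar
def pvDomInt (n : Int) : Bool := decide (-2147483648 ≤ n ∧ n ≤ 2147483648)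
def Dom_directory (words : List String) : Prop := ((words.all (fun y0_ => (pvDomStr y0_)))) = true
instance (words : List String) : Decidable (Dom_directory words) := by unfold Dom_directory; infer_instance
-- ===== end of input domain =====

-- B replaces A's index-driven incremental counting loop with a map over words building
-- each frequency list from the distinct letters with per-letter recounts (alternative, not faster).


-- ===== PORT A =====
-- for i in range(len(words)): directAll.append({}); wor = words[i];
--   for a in range(len(wor)): le = wor[a]; if le in d: d[le] += 1 else d[le] = 1
-- (Python indexing wor[a] yields a 1-char string: ported as String.ofList [·]; each dict is
-- returned as its items list per the type convention.)
def directory (words : List String) : List (List (String × Int)) :=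
  (PySem.List.pyRange 0 words.length 1).foldl
    (fun directAll i =>
      let wor := PySem.List.pyGetD words i ""
      let d :=
        (PySem.List.pyRange 0 wor.toList.length 1).foldl
          (fun d a =>
            let le := String.ofList [PySem.List.pyGetD wor.toList a ' ']
            if d.contains le then d.insert le (d.getD le 0 + 1)
            else d.insert le 1)
          (PySem.Dict.empty : PySem.Dict String Int)
      directAll ++ [d.items])
    []

-- ===== PORT B =====
-- [{c: list(word).count(c) for c in dict.fromkeys(word)} for word in words]
def directory_alt (words : List String) : List (List (String × Int)) :=
  words.map (fun word =>
    let ls := word.toList.map (fun c => String.ofList [c])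
    (PySem.List.dedup ls).map (fun c => (c, (ls.count c : Int))))

-- ===== PRECONDITION & SPEC =====
def Spec_directory (words : List String) (out : List (List (String × Int))) : Prop := out = directory_alt words
instance (words : List String) (out : List (List (String × Int))) : Decidable (Spec_directory words out) := by unfold Spec_directory; infer_instance

-- ===== CLAIM (what is proved, stated in full; the proofs are below) =====
def Claim_equal_directory : Prop := ∀ (words : List String), Dom_directory words → Spec_directory words (directory words)

-- ===== LEMMAS AND PROOFS =====

-- A's per-word loop builds exactly Counter(letters) (both branches are the same insert).
theorem directory_inner_eq (wor : String) :
    ((PySem.List.pyRange 0 wor.toList.length 1).foldl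
      (fun d a =>
        let le := String.ofList [PySem.List.pyGetD wor.toList a ' ']
        if d.contains le then d.insert le (d.getD le 0 + 1)
        else d.insert le 1)
      (PySem.Dict.empty : PySem.Dict String Int)).items
    = (let ls := wor.toList.map (fun c => String.ofList [c])
       (PySem.List.dedup ls).map (fun c => (c, (ls.count c : Int)))) := by
  rw [show ((wor.toList.length : Int)) = PySem.List.len wor.toList from rfl,
      PySem.List.foldl_pyRange_zero_pyGetD wor.toList ' '
        (fun (d : PySem.Dict String Int) v =>
          let le := String.ofList [v]
          if d.contains le then d.insert le (d.getD le 0 + 1) else d.insert le 1)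
        PySem.Dict.empty]
  have hcong :
      wor.toList.foldl
        (fun (d : PySem.Dict String Int) v =>
          let le := String.ofList [v]
          if d.contains le then d.insert le (d.getD le 0 + 1) else d.insert le 1)
        PySem.Dict.empty
      = wor.toList.foldl
          (fun (d : PySem.Dict String Int) c =>
            d.insert (String.ofList [c]) (d.getD (String.ofList [c]) 0 + 1))
          PySem.Dict.empty := by
    apply PySem.List.foldl_congr_mem
    intro d c _
    by_cases h : d.contains (String.ofList [c]) = true
    · simp [h]
    · have h0 : d.getD (String.ofList [c]) 0 = 0 := by
        unfold PySem.Dict.getD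
        rw [(PySem.Dict.get?_eq_none_iff_contains d (String.ofList [c])).2 (by simpa using h)]
        rfl
      simp [h, h0]
  rw [hcong,
      ← List.foldl_map (f := fun c => String.ofList [c])
        (g := fun (d : PySem.Dict String Int) s => d.insert s (d.getD s 0 + 1)),
      PySem.Dict.foldl_insert_getD_add_one_eq_counter,
      PySem.Dict.items_counter]
  simp

-- ===== VERDICT (by name: the statement is the Claim_ definition above) =====
theorem directory_spec : Claim_equal_directory := by
  intro words _
  unfold Spec_directory directory directory_alt
  rw [show ((words.length : Int)) = PySem.List.len words from rfl,
      PySem.List.foldl_pyRange_zero_pyGetD words ""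
        (fun (directAll : List (List (String × Int))) wor =>
          let d :=
            (PySem.List.pyRange 0 wor.toList.length 1).foldl
              (fun d a =>
                let le := String.ofList [PySem.List.pyGetD wor.toList a ' ']
                if d.contains le then d.insert le (d.getD le 0 + 1)
                else d.insert le 1)
              (PySem.Dict.empty : PySem.Dict String Int)
          directAll ++ [d.items]) [],
      PySem.List.foldl_append_singleton_eq_map]
  simp only [List.nil_append]
  exact List.map_congr_left (fun wor _ => directory_inner_eq wor)
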